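-- pv_equiv track=rewrite | github.com/liyigenius/myleetgame | py/leetcode/solution1329.py | getLL
-- ===== SOURCE A (Python) =====
-- def getLL(h,w,maxH, maxW):
--     ll = []
--     ll.append((h,w))
--     while True:
--         t1 = ll[-1]
--         new1 = t1[0]+1, t1[1]+1
--         if new1[0] > maxH - 1 or new1[1] > maxW -1:
--             break
--         ll.append(new1)
--     return ll
-- ===== SOURCE B (Python) =====
-- def getLL(h, w, maxH, maxW):
--     n = max(1, min(maxH - h, maxW - w))
--     return [(h + i, w + i) for i in range(n)]
-- ===== Notes on version B (the rewrite author's own statement) =====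
-- stated objective: simpler
-- what changed: Replaces the grow-until-out-of-bounds while-loop over the last appended element by a closed-form element count n = max(1, min(maxH-h, maxW-w)) and a single range comprehension.
import Mathlib
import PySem

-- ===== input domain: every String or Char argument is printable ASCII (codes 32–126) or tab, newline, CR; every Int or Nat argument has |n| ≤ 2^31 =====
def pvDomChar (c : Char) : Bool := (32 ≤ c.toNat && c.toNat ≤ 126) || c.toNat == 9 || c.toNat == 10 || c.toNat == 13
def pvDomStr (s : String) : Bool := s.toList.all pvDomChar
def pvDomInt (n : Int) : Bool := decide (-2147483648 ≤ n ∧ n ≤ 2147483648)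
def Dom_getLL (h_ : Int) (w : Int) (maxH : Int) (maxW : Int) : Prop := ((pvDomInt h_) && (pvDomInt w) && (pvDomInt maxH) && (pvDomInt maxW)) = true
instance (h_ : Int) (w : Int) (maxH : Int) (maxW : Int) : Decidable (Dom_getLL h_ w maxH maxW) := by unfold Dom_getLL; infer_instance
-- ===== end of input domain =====

-- B replaces A's grow-until-out-of-bounds while-loop by a closed-form count and one range map (objective: simpler).

-- ===== PORT A =====
-- the 'while True' loop: cur is ll[-1]; terminates because maxH - cur.1 shrinks
def getLLloop (maxH maxW : Int) (cur : Int × Int) (acc : List (Int × Int)) : List (Int × Int) :=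
  if cur.1 + 1 > maxH - 1 ∨ cur.2 + 1 > maxW - 1 then acc
  else getLLloop maxH maxW (cur.1 + 1, cur.2 + 1) (acc ++ [(cur.1 + 1, cur.2 + 1)])
termination_by (maxH - cur.1).toNat
decreasing_by simp at *; omega

def getLL (h_ : Int) (w : Int) (maxH : Int) (maxW : Int) : List (Int × Int) :=
  getLLloop maxH maxW (h_, w) [(h_, w)]

-- ===== PORT B =====
def getLL_alt (h_ : Int) (w : Int) (maxH : Int) (maxW : Int) : List (Int × Int) :=
  -- n = max(1, min(maxH - h, maxW - w)); [(h+i, w+i) for i in range(n)]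
  (PySem.List.pyRange 0 (max 1 (min (maxH - h_) (maxW - w))) 1).map (fun i => (h_ + i, w + i))

-- ===== PRECONDITION & SPEC =====
def Spec_getLL (h_ : Int) (w : Int) (maxH : Int) (maxW : Int) (out : List (Int × Int)) : Prop := out = getLL_alt h_ w maxH maxW
instance (h_ : Int) (w : Int) (maxH : Int) (maxW : Int) (out : List (Int × Int)) : Decidable (Spec_getLL h_ w maxH maxW out) := by unfold Spec_getLL; infer_instance

-- ===== CLAIM (what is proved, stated in full; the proofs are below) =====
def Claim_equal_getLL : Prop := ∀ (h_ : Int) (w : Int) (maxH : Int) (maxW : Int), Dom_getLL h_ w maxH maxW → Spec_getLL h_ w maxH maxW (getLL h_ w maxH maxW)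

-- ===== LEMMAS AND PROOFS =====

-- the loop appends exactly the next m diagonal cells, m = min of the remaining room
theorem getLLloop_eq (maxH maxW : Int) (a b : Int) (acc : List (Int × Int)) :
    getLLloop maxH maxW (a, b) acc =
      acc ++ (List.range (min (maxH - 1 - a) (maxW - 1 - b)).toNat).map
        (fun (k : Nat) => (a + 1 + (k : Int), b + 1 + (k : Int))) := by
  by_cases h : a + 1 > maxH - 1 ∨ b + 1 > maxW - 1
  · have hm : (min (maxH - 1 - a) (maxW - 1 - b)).toNat = 0 := by omega
    rw [getLLloop.eq_def, if_pos h, hm]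
    simp
  · have hm : (min (maxH - 1 - a) (maxW - 1 - b)).toNat
        = (min (maxH - 1 - (a + 1)) (maxW - 1 - (b + 1))).toNat + 1 := by omega
    rw [getLLloop.eq_def, if_neg h, getLLloop_eq maxH maxW (a + 1) (b + 1),
        hm, List.range_succ_eq_map, List.map_cons, List.map_map, List.append_assoc,
        List.singleton_append]
    congr 1
    rw [List.cons.injEq]
    constructor
    · norm_num
    · apply List.map_congr_left
      intro k _
      simp only [Function.comp, Nat.succ_eq_add_one]
      rw [Prod.mk.injEq]
      push_cast
      constructor <;> ring
termination_by (maxH - a).toNat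
decreasing_by omega

-- ===== VERDICT (by name: the statement is the Claim_ definition above) =====
theorem getLL_spec : Claim_equal_getLL := by
  intro h_ w maxH maxW _
  unfold Spec_getLL getLL getLL_alt
  have hn : (max 1 (min (maxH - h_) (maxW - w)) - 0).toNat
      = (min (maxH - 1 - h_) (maxW - 1 - w)).toNat + 1 := by omega
  rw [getLLloop_eq, PySem.List.pyRange_one, hn, List.range_succ_eq_map]
  simp only [List.map_cons, List.map_map, List.singleton_append]
  rw [List.cons.injEq]
  constructor
  · norm_num
  · apply List.map_congr_left
    intro k _
    simp only [Function.comp_apply]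
    rw [Prod.mk.injEq]
    push_cast
    constructor <;> ring
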